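-- pv_equiv track=rewrite | github.com/aniketmondal1210/LeetCode-Odyssey | 3909. Compare Sums of Bitonic Parts/compare_sums_of_biotonic_parts.py | compareBitonicSums
-- ===== SOURCE A (Python) =====
-- def compareBitonicSums(nums: list[int]) -> int:
--     asc_sum = 0
--     desc_sum = 0
--     max_idx = 0
--
--     for i in range(1,len(nums)):
--         if nums[i] > nums[i-1]:
--             max_idx = i
--         else:
--             break
--
--     for i in range(max_idx + 1):
--         asc_sum += nums[i]
--     for j in range(max_idx, len(nums)):
--         desc_sum += nums[j]
--
--     if asc_sum > desc_sum:
--         return 0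
--     elif asc_sum < desc_sum:
--         return 1
--     else:
--         return -1
-- ===== SOURCE B (Python) =====
-- def compareBitonicSums(nums: list[int]) -> int:
--     # Never computes the descending sum: desc = total - asc + peak, so
--     # asc <> desc reduces to the sign of d = 2*asc - peak - total.
--     total = sum(nums)
--     asc = peak = nums[0]
--     for prev, cur in zip(nums, nums[1:]):
--         if cur <= prev:
--             break
--         asc += cur
--         peak = cur
--     d = 2 * asc - peak - total
--     return 0 if d > 0 else (1 if d < 0 else -1)
-- ===== Notes on version B (the rewrite author's own statement) =====
-- stated objective: alternative
-- what changed: B never computes the descending sum: it takes the whole-array total once with sum(), climbs the strictly increasing prefix over zipped adjacent pairs accumulating asc and the peak element, and returns the three-way sign of the single expression 2*asc - peak - total (correct since desc = total - asc + peak).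
import Mathlib
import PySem

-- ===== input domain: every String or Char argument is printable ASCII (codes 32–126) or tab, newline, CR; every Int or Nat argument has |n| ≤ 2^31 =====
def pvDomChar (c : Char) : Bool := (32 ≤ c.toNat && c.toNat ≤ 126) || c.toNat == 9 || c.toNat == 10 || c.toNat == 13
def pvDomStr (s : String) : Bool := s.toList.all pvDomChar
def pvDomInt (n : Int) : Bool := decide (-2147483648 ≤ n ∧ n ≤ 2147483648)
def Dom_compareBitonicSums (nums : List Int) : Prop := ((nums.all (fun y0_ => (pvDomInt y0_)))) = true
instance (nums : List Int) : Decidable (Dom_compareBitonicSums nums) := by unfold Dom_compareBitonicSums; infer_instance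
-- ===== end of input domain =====

-- B avoids A's descending-sum pass entirely: it compares the sign of 2*asc - peak - total instead (objective: alternative); return-value equivalence on nonempty lists (A raises IndexError on []).

-- ===== PORT A =====
-- A's first loop: for i in range(1, len(nums)): if nums[i] > nums[i-1]: max_idx = i else: break
-- (indices are always in range here, so List.getD is exact for Python's nums[i])
def pvPeakLoop (nums : List Int) (i maxIdx : Nat) : Nat :=
  if _h : i < nums.length then
    if nums.getD i 0 > nums.getD (i - 1) 0 then pvPeakLoop nums (i + 1) i
    else maxIdx
  else maxIdx
termination_by nums.length - i

def compareBitonicSums (nums : List Int) : Int :=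
  let maxIdx := pvPeakLoop nums 1 0
  let ascSum := (PySem.List.pyRange 0 ((maxIdx : Int) + 1) 1).foldl
      (fun s i => s + PySem.List.pyGetD nums i 0) 0
  let descSum := (PySem.List.pyRange (maxIdx : Int) (PySem.List.len nums) 1).foldl
      (fun s j => s + PySem.List.pyGetD nums j 0) 0
  if ascSum > descSum then 0
  else if ascSum < descSum then 1
  else -1

-- ===== PORT B =====
-- B's climb over zipped adjacent pairs: for prev, cur in zip(nums, nums[1:]) — structural
-- recursion with prev carried along (rest is the not-yet-visited tail of nums[1:])
def pvClimb (prev : Int) (rest : List Int) (asc peak : Int) : Int × Int :=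
  match rest with
  | [] => (asc, peak)
  | cur :: t => if cur ≤ prev then (asc, peak) else pvClimb cur t (asc + cur) cur

def compareBitonicSums_alt (nums : List Int) : Int :=
  let total := nums.sum                                   -- total = sum(nums)
  let h := nums.getD 0 0                                  -- nums[0] (Pre_: nums ≠ [])
  let p := pvClimb h nums.tail h h
  let d := 2 * p.1 - p.2 - total                          -- d = 2*asc - peak - total
  if d > 0 then 0 else if d < 0 then 1 else -1

-- ===== PRECONDITION & SPEC =====
-- Pre_ excludes only the empty list, on which both A and B raise IndexError (nums[0]).
def Pre_compareBitonicSums (nums : List Int) : Prop := nums ≠ []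
instance (nums : List Int) : Decidable (Pre_compareBitonicSums nums) := by unfold Pre_compareBitonicSums; infer_instance
def pvWitness_compareBitonicSums : List Int := [1, 3, 2]

def Spec_compareBitonicSums (nums : List Int) (out : Int) : Prop := out = compareBitonicSums_alt nums
instance (nums : List Int) (out : Int) : Decidable (Spec_compareBitonicSums nums out) := by unfold Spec_compareBitonicSums; infer_instance

-- ===== CLAIM (what is proved, stated in full; the proofs are below) =====
def Claim_equal_compareBitonicSums : Prop := ∀ (nums : List Int), Dom_compareBitonicSums nums → Pre_compareBitonicSums nums → Spec_compareBitonicSums nums (compareBitonicSums nums)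

-- ===== LEMMAS AND PROOFS =====

-- the peak index stays in range
lemma pvPeakLoop_lt (nums : List Int) (i m : Nat) (hm : m < nums.length) :
    pvPeakLoop nums i m < nums.length := by
  fun_induction pvPeakLoop nums i m with
  | case1 i m h hgt ih => exact ih ‹_›
  | case2 i m h hgt => exact hm
  | case3 i m h => exact hm

lemma pvTakeSuccSum (nums : List Int) (k : Nat) :
    (nums.take (k + 1)).sum = (nums.take k).sum + nums.getD k 0 := by
  rw [List.take_add_one, List.sum_append, List.getD_eq_getElem?_getD]
  cases nums[k]? <;> simp

-- A's asc index loop sums the first k elements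
lemma pvSumRange (nums : List Int) (k : Nat) :
    (PySem.List.pyRange 0 (k : Int) 1).foldl (fun s i => s + PySem.List.pyGetD nums i 0) 0
      = (nums.take k).sum := by
  induction k with
  | zero => simp [PySem.List.pyRange_one_eq_nil]
  | succ k ih =>
    have hc : ((k + 1 : Nat) : Int) = (k : Int) + 1 := by push_cast; ring
    rw [hc, PySem.List.pyRange_one_succ_right (by positivity), List.foldl_append]
    simp only [List.foldl_cons, List.foldl_nil, ih, PySem.List.pyGetD_natCast]
    exact (pvTakeSuccSum nums k).symm

-- B's climb computes A's ascending sum and the peak element, in lockstep with pvPeakLoop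
lemma pvClimb_eq (nums : List Int) (rest : List Int) : ∀ (i : Nat), 1 ≤ i → rest = nums.drop i →
    pvClimb (nums.getD (i - 1) 0) rest ((nums.take i).sum) (nums.getD (i - 1) 0)
      = ((nums.take (pvPeakLoop nums i (i - 1) + 1)).sum,
         nums.getD (pvPeakLoop nums i (i - 1)) 0) := by
  induction rest with
  | nil =>
    intro i hi hdrop
    have hlen : nums.length ≤ i := by
      by_contra hlt
      have hne : nums.drop i ≠ [] := by
        simp [List.drop_eq_nil_iff]; omega
      exact hne hdrop.symm
    rw [pvPeakLoop, dif_neg (by omega)]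
    simp [pvClimb, Nat.sub_add_cancel hi]
  | cons cur t ih =>
    intro i hi hdrop
    have hlt : i < nums.length := by
      by_contra hge
      rw [List.drop_eq_nil_of_le (by omega)] at hdrop
      exact List.cons_ne_nil _ _ hdrop
    have hpair := hdrop.trans (List.drop_eq_getElem_cons hlt (l := nums))
    have hcur : cur = nums.getD i 0 := by
      injection hpair with h1 _
      simp [h1, List.getD_eq_getElem?_getD, List.getElem?_eq_getElem hlt]
    have ht : t = nums.drop (i + 1) := by
      injection hpair with _ h2
    rw [pvPeakLoop, dif_pos hlt]
    by_cases hgt : nums.getD i 0 > nums.getD (i - 1) 0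
    · rw [if_pos hgt, pvClimb, if_neg (by rw [hcur]; omega)]
      have := ih (i + 1) (by omega) ht
      simpa [hcur, Nat.add_sub_cancel, pvTakeSuccSum] using this
    · rw [if_neg hgt, pvClimb, if_pos (by rw [hcur]; omega)]
      simp [Nat.sub_add_cancel hi]

-- ===== VERDICT (by name: the statement is the Claim_ definition above) =====
theorem compareBitonicSums_spec : Claim_equal_compareBitonicSums := by
  intro nums _ hpre
  unfold Spec_compareBitonicSums compareBitonicSums compareBitonicSums_alt
  have hlen : 0 < nums.length := List.length_pos_of_ne_nil hpre
  set k := pvPeakLoop nums 1 0 with hk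
  have hpk : k < nums.length := pvPeakLoop_lt nums 1 0 hlen
  have h0 : nums.getD 0 0 = (nums.take 1).sum := by
    cases nums with
    | nil => exact absurd rfl hpre
    | cons x t => simp
  -- B's climb: asc = take (k+1) sum, peak element = nums[k]
  have hclimb : pvClimb (nums.getD 0 0) nums.tail (nums.getD 0 0) (nums.getD 0 0)
      = ((nums.take (k + 1)).sum, nums.getD k 0) := by
    have := pvClimb_eq nums nums.tail 1 le_rfl (by simp [List.drop_one])
    rw [← h0, ← hk] at this
    exact this
  -- A's asc sum
  have hasc : (PySem.List.pyRange 0 ((k : Int) + 1) 1).foldl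
      (fun s i => s + PySem.List.pyGetD nums i 0) 0 = (nums.take (k + 1)).sum := by
    have hc : ((k + 1 : Nat) : Int) = (k : Int) + 1 := by push_cast; ring
    rw [← hc, pvSumRange]
  -- A's desc sum
  have hdesc : (PySem.List.pyRange (k : Int) (PySem.List.len nums) 1).foldl
      (fun s j => s + PySem.List.pyGetD nums j 0) 0 = (nums.drop k).sum := by
    rw [PySem.List.foldl_pyRange_pyGetD nums 0 (fun s x => s + x) 0 (by positivity)]
    rw [Int.toNat_natCast, List.sum_eq_foldl]
  -- algebra: desc = total - take k sum, asc = take k sum + nums[k]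
  have hsplit : (nums.take k).sum + (nums.drop k).sum = nums.sum := by
    conv_rhs => rw [← List.take_append_drop k nums]
    rw [List.sum_append]
  have htk : (nums.take (k + 1)).sum = (nums.take k).sum + nums.getD k 0 :=
    pvTakeSuccSum nums k
  simp only [hclimb, hasc, hdesc]
  split_ifs <;> omega
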